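-- pv_equiv track=rewrite | github.com/Juroldang/code | PC - 2024 - 1/VJudge - Listas/U - Advantage.py | dif_strenght
-- ===== SOURCE A (Python) =====
-- def dif_strenght(n, p):
--     temp = sorted(p, reverse=True)
--     dif = []
--     max_s, second_max_s = temp[0], temp[1]
--     for i in range(n):
--         if p[i] == max_s: dif.append(p[i]-second_max_s)
--         else: dif.append(p[i]-max_s)
--     return " ".join(list(map(str, dif)))
-- ===== SOURCE B (Python) =====
-- def dif_strenght(n, p):
--     # single linear pass keeping the top two values instead of sorting
--     if p[0] >= p[1]:
--         max1, max2 = p[0], p[1]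
--     else:
--         max1, max2 = p[1], p[0]
--     for x in p[2:]:
--         if x >= max1:
--             max2, max1 = max1, x
--         elif x > max2:
--             max2 = x
--     dif = []
--     for i in range(n):
--         dif.append(p[i] - max2 if p[i] == max1 else p[i] - max1)
--     return " ".join(map(str, dif))
-- ===== Notes on version B (the rewrite author's own statement) =====
-- stated objective: alternative
-- what changed: B finds the maximum and second maximum in one linear scan with a (max1,max2) accumulator instead of sorting the whole list in reverse; the difference-list step is unchanged.
import Mathlib
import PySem

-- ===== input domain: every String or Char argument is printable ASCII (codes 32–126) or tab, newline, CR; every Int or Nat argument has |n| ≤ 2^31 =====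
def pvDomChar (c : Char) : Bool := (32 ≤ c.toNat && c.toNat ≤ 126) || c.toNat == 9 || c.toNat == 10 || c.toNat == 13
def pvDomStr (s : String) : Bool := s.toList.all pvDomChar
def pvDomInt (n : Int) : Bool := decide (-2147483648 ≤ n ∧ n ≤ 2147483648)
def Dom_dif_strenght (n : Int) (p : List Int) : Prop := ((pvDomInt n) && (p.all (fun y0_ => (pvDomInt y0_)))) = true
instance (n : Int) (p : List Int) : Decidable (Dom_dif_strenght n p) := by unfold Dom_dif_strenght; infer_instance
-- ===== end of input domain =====

-- B replaces the reverse sort by a single linear scan keeping the top two values in a (max1,max2) accumulator.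


-- ===== PORT A =====
def dif_strenght (n : Int) (p : List Int) : String :=
  let temp := PySem.List.sorted p (fun x => x) true
  -- temp[0], temp[1]: in range under Pre_ (IndexError outside, excluded by Pre_)
  let max_s := PySem.List.pyGetD temp 0 0
  let second_max_s := PySem.List.pyGetD temp 1 0
  let dif := (PySem.List.pyRange 0 n 1).foldl (fun acc i =>
      if PySem.List.pyGetD p i 0 == max_s then acc ++ [PySem.List.pyGetD p i 0 - second_max_s]
      else acc ++ [PySem.List.pyGetD p i 0 - max_s]) []
  PySem.Str.join " " (dif.map PySem.Int.toStr)

-- ===== PORT B =====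
def dif_strenght_alt (n : Int) (p : List Int) : String :=
  -- p[0], p[1]: in range under Pre_ (IndexError outside, excluded by Pre_)
  let m0 := PySem.List.pyGetD p 0 0
  let m1 := PySem.List.pyGetD p 1 0
  let init : Int × Int := if m0 ≥ m1 then (m0, m1) else (m1, m0)
  -- for x in p[2:]  (p.drop 2 is exact for the nonnegative slice p[2:])
  let mm := (p.drop 2).foldl (fun (m : Int × Int) x =>
      if x ≥ m.1 then (x, m.1) else if x > m.2 then (m.1, x) else m) init
  let dif := (PySem.List.pyRange 0 n 1).foldl (fun acc i =>
      acc ++ [if PySem.List.pyGetD p i 0 == mm.1 then PySem.List.pyGetD p i 0 - mm.2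
              else PySem.List.pyGetD p i 0 - mm.1]) []
  PySem.Str.join " " (dif.map PySem.Int.toStr)

-- ===== PRECONDITION & SPEC =====
-- Pre_ excludes exactly the inputs where A raises IndexError: fewer than two elements
-- (temp[1]) or n exceeding len(p) (p[i]).  B raises on the same inputs.
def Pre_dif_strenght (n : Int) (p : List Int) : Prop :=
  2 ≤ (p.length : Int) ∧ n ≤ (p.length : Int)
instance (n : Int) (p : List Int) : Decidable (Pre_dif_strenght n p) := by
  unfold Pre_dif_strenght; infer_instance
def pvWitness_dif_strenght : Int × List Int := (3, [1, 3, 2])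

def Spec_dif_strenght (n : Int) (p : List Int) (out : String) : Prop := out = dif_strenght_alt n p
instance (n : Int) (p : List Int) (out : String) : Decidable (Spec_dif_strenght n p out) := by unfold Spec_dif_strenght; infer_instance

-- ===== CLAIM (what is proved, stated in full; the proofs are below) =====
def Claim_equal_dif_strenght : Prop := ∀ (n : Int) (p : List Int), Dom_dif_strenght n p → Pre_dif_strenght n p → Spec_dif_strenght n p (dif_strenght n p)

-- ===== LEMMAS AND PROOFS =====

-- maximum of a nonempty list (0 on [])
def maxOf : List Int → Int
  | [] => 0
  | a :: t => t.foldl max a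

theorem foldl_max_max (l : List Int) : ∀ a b : Int,
    l.foldl max (max a b) = max a (l.foldl max b) := by
  induction l with
  | nil => intro a b; rfl
  | cons c t ih =>
    intro a b
    show t.foldl max (max (max a b) c) = max a (t.foldl max (max b c))
    rw [max_assoc, ih]

theorem le_foldl_max (l : List Int) : ∀ a : Int,
    a ≤ l.foldl max a ∧ ∀ x ∈ l, x ≤ l.foldl max a := by
  induction l with
  | nil => intro a; exact ⟨le_refl a, by simp⟩
  | cons b t ih =>
    intro a
    have h := ih (max a b)
    refine ⟨le_trans (le_max_left a b) h.1, ?_⟩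
    intro x hx
    rcases List.mem_cons.1 hx with rfl | hx
    · exact le_trans (le_max_right a x) h.1
    · exact h.2 x hx

theorem foldl_max_mem (l : List Int) : ∀ a : Int, l.foldl max a ∈ a :: l := by
  induction l with
  | nil => intro a; simp
  | cons b t ih =>
    intro a
    have h := ih (max a b)
    rw [List.foldl_cons]
    rcases List.mem_cons.1 h with h' | h'
    · rw [h']
      rcases max_choice a b with hc | hc <;> rw [hc] <;> simp
    · simp [h']

theorem maxOf_mem (l : List Int) (h : l ≠ []) : maxOf l ∈ l := by
  cases l with
  | nil => exact absurd rfl h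
  | cons a t => exact foldl_max_mem t a

theorem le_maxOf (l : List Int) (x : Int) (hx : x ∈ l) : x ≤ maxOf l := by
  cases l with
  | nil => simp at hx
  | cons a t =>
    rcases List.mem_cons.1 hx with h' | h'
    · subst h'; exact (le_foldl_max t x).1
    · exact (le_foldl_max t a).2 x h'

theorem maxOf_eq (l : List Int) (m : Int) (hm : m ∈ l) (hb : ∀ x ∈ l, x ≤ m) :
    maxOf l = m :=
  le_antisymm (hb _ (maxOf_mem l (by rintro rfl; simp at hm))) (le_maxOf l m hm)

theorem maxOf_perm {l l' : List Int} (h : l.Perm l') : maxOf l = maxOf l' := by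
  cases l with
  | nil => rw [← h.nil_eq]
  | cons a t =>
    exact (maxOf_eq l' (maxOf (a :: t)) (h.mem_iff.1 (maxOf_mem _ (by simp)))
      (fun x hx => le_maxOf _ x (h.mem_iff.2 hx))).symm

theorem maxOf_cons (a : Int) (l : List Int) (h : l ≠ []) :
    maxOf (a :: l) = max a (maxOf l) := by
  cases l with
  | nil => exact absurd rfl h
  | cons b t => show t.foldl max (max a b) = max a (t.foldl max b); exact foldl_max_max t a b

-- the pair of interest: (max, max after removing one occurrence of the max)
def top2 (l : List Int) : Int × Int := (maxOf l, maxOf (l.erase (maxOf l)))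

theorem top2_perm {l l' : List Int} (h : l.Perm l') : top2 l = top2 l' := by
  unfold top2
  rw [maxOf_perm h, maxOf_perm (h.erase (maxOf l'))]

-- dropping an element d below the top two does not change top2
theorem top2_drop (d n1 n2 : Int) (r : List Int) (hd : d ≤ n2) (hn : n2 ≤ n1) :
    top2 (d :: n1 :: n2 :: r) = top2 (n1 :: n2 :: r) := by
  set L' : List Int := n1 :: n2 :: r with hL'
  have hMx1 : n1 ≤ maxOf L' := le_maxOf _ _ (by simp [hL'])
  have hMx2 : n2 ≤ maxOf L' := le_maxOf _ _ (by simp [hL'])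
  have hmax : maxOf (d :: L') = maxOf L' := by
    rw [maxOf_cons d L' (by simp [hL'])]
    exact max_eq_right (le_trans hd (le_trans hn hMx1))
  unfold top2
  rw [hmax]
  congr 1
  by_cases hdm : d = maxOf L'
  · -- then d = n1 = n2 = maxOf L'
    have h1 : n1 = maxOf L' := le_antisymm hMx1 (by rw [← hdm]; exact le_trans hd hn)
    have h2 : n2 = maxOf L' := le_antisymm hMx2 (by rw [← hdm]; exact hd)
    have e1 : (d :: L').erase (maxOf L') = L' := by rw [← hdm, List.erase_cons_head]
    have e2 : L'.erase (maxOf L') = n2 :: r := by rw [hL', ← h1, List.erase_cons_head]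
    rw [e1, e2]
    have e3 : maxOf L' = max n1 (maxOf (n2 :: r)) := by
      rw [hL']; exact maxOf_cons _ _ (by simp)
    rw [e3]
    exact max_eq_right (le_trans (le_of_eq (h1.trans h2.symm)) (le_maxOf _ _ (by simp)))
  · rw [List.erase_cons_tail (by simpa using hdm)]
    have hne : L'.erase (maxOf L') ≠ [] := by
      have := List.length_erase_of_mem (maxOf_mem L' (by simp [hL'])) 
      intro he; rw [he] at this; simp [hL'] at this
    rw [maxOf_cons d _ hne]
    refine max_eq_right ?_
    -- find an element ≥ d surviving the erase
    by_cases h1 : n1 = maxOf L'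
    · have : L'.erase (maxOf L') = n2 :: r := by rw [hL', ← h1, List.erase_cons_head]
      rw [this]; exact le_trans hd (le_maxOf _ _ (by simp))
    · have : L'.erase (maxOf L') = n1 :: ((n2 :: r).erase (maxOf L')) := by
        rw [hL', List.erase_cons_tail (by simpa using h1)]
      rw [this]
      exact le_trans (le_trans hd hn) (le_maxOf _ _ (by simp))

-- the scan computes top2
theorem fold_top2 (r : List Int) : ∀ m1 m2 : Int, m2 ≤ m1 →
    r.foldl (fun (m : Int × Int) x =>
      if x ≥ m.1 then (x, m.1) else if x > m.2 then (m.1, x) else m) (m1, m2)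
      = top2 (m1 :: m2 :: r) := by
  induction r with
  | nil =>
    intro m1 m2 h
    unfold top2
    have hm : maxOf [m1, m2] = m1 :=
      maxOf_eq _ _ (by simp) (by intro x hx; simp at hx; rcases hx with rfl | rfl; exacts [le_refl x, h])
    rw [hm, List.erase_cons_head]
    rfl
  | cons x r' ih =>
    intro m1 m2 h
    show List.foldl _ (if x ≥ m1 then (x, m1) else if x > m2 then (m1, x) else (m1, m2)) r' = _
    by_cases h1 : x ≥ m1
    · rw [if_pos h1, ih x m1 h1]
      have : (m1 :: m2 :: x :: r').Perm (m2 :: x :: m1 :: r') := by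
        refine List.Perm.trans (List.Perm.swap _ _ _) ?_
        exact List.Perm.cons _ (List.Perm.swap _ _ _)
      rw [top2_perm this, top2_drop m2 x m1 r' h h1]
    · rw [if_neg h1]
      have hlt : x < m1 := lt_of_not_ge h1
      by_cases h2 : x > m2
      · rw [if_pos h2, ih m1 x (le_of_lt hlt)]
        have : (m1 :: m2 :: x :: r').Perm (m2 :: m1 :: x :: r') := List.Perm.swap _ _ _
        rw [top2_perm this, top2_drop m2 m1 x r' (le_of_lt h2) (le_of_lt hlt)]
      · rw [if_neg h2, ih m1 m2 h]
        have hx2 : x ≤ m2 := le_of_not_gt h2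
        have : (m1 :: m2 :: x :: r').Perm (x :: m1 :: m2 :: r') := by
          refine List.Perm.trans ?_ (List.Perm.swap _ _ _)
          exact List.Perm.cons _ (List.Perm.swap _ _ _)
        rw [top2_perm this, top2_drop x m1 m2 r' hx2 h]

-- sorted-descending head and second element are top2
theorem sorted_top2 (p : List Int) (h2 : 2 ≤ p.length) :
    ∃ t, PySem.List.sorted p (fun x => x) true = (top2 p).1 :: (top2 p).2 :: t := by
  have hperm : (PySem.List.sorted p (fun x => x) true).Perm p := PySem.List.sorted_perm p _ _
  have hlen : (PySem.List.sorted p (fun x => x) true).length = p.length :=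
    hperm.length_eq
  match hs : PySem.List.sorted p (fun x => x) true with
  | [] => rw [hs] at hlen; simp at hlen; omega
  | [m] => rw [hs] at hlen; simp at hlen; omega
  | m :: m2 :: t =>
    refine ⟨t, ?_⟩
    rw [hs] at hperm
    have hub : ∀ y ∈ p, y ≤ m := by
      intro y hy
      exact PySem.List.key_head_sorted_rev_ge p (fun x : Int => x) hs y hy
    have hm : maxOf p = m :=
      maxOf_eq p m (hperm.mem_iff.1 (by simp)) hub
    have hpw : (m :: m2 :: t).Pairwise (fun a b : Int => b ≤ a) := by
      have := PySem.List.sorted_pairwise_rev p (fun x : Int => x)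
      rw [hs] at this
      exact this
    have hpw2 : ∀ y ∈ m2 :: t, y ≤ m2 := by
      intro y hy
      rcases List.mem_cons.1 hy with rfl | hy
      · exact le_refl y
      · exact ((List.pairwise_cons.1 (List.pairwise_cons.1 hpw).2).1) y hy
    have hperm2 : (m2 :: t).Perm (p.erase m) := by
      have := hperm.erase m
      rwa [List.erase_cons_head] at this
    have hm2 : maxOf (p.erase m) = m2 :=
      maxOf_eq _ m2 (hperm2.mem_iff.1 (by simp))
        (fun x hx => hpw2 x (hperm2.mem_iff.2 hx))
    unfold top2
    rw [hm, hm2]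

-- ===== VERDICT (by name: the statement is the Claim_ definition above) =====
theorem pyGetD_one_cons (a b : Int) (r : List Int) (d : Int) :
    PySem.List.pyGetD (a :: b :: r) 1 d = b := by
  simp [PySem.List.pyGetD, PySem.List.pyGet?, PySem.List.pyIdx?]

theorem dif_strenght_spec : Claim_equal_dif_strenght := by
  intro n p hdom hpre
  obtain ⟨h2, hn⟩ := hpre
  have h2' : 2 ≤ p.length := by exact_mod_cast h2
  rcases p with _ | ⟨a, _ | ⟨b, r⟩⟩
  · simp at h2'
  · simp at h2'
  obtain ⟨t, hs⟩ := sorted_top2 (a :: b :: r) h2'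
  unfold Spec_dif_strenght dif_strenght dif_strenght_alt
  dsimp only
  rw [hs, PySem.List.pyGetD_zero_cons, pyGetD_one_cons, PySem.List.pyGetD_zero_cons,
    pyGetD_one_cons]
  have hdrop : (a :: b :: r).drop 2 = r := rfl
  rw [hdrop]
  have hmm : r.foldl (fun (m : Int × Int) x =>
      if x ≥ m.1 then (x, m.1) else if x > m.2 then (m.1, x) else m)
      (if a ≥ b then (a, b) else (b, a)) = top2 (a :: b :: r) := by
    by_cases h : a ≥ b
    · rw [if_pos h, fold_top2 r a b h]
    · rw [if_neg h, fold_top2 r b a (le_of_not_ge h)]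
      exact top2_perm (List.Perm.swap _ _ _)
  rw [hmm]
  have hfn : (fun (acc : List Int) (i : Int) =>
      if PySem.List.pyGetD (a :: b :: r) i 0 == (top2 (a :: b :: r)).1 then
        acc ++ [PySem.List.pyGetD (a :: b :: r) i 0 - (top2 (a :: b :: r)).2]
      else acc ++ [PySem.List.pyGetD (a :: b :: r) i 0 - (top2 (a :: b :: r)).1]) =
      (fun (acc : List Int) (i : Int) =>
        acc ++ [if PySem.List.pyGetD (a :: b :: r) i 0 == (top2 (a :: b :: r)).1 then
          PySem.List.pyGetD (a :: b :: r) i 0 - (top2 (a :: b :: r)).2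
        else PySem.List.pyGetD (a :: b :: r) i 0 - (top2 (a :: b :: r)).1]) := by
    funext acc i
    by_cases h : (PySem.List.pyGetD (a :: b :: r) i 0 == (top2 (a :: b :: r)).1) = true <;>
      simp [h]
  rw [hfn]
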